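-- pv_equiv track=rewrite | github.com/Bhargav02550/codemind-python | first k occurrence.py | find_first_k_occurrence
-- ===== SOURCE A (Python) =====
-- def find_first_k_occurrence(arr, k):
--     element_count = {}
--
--     for element in arr:
--         if element in element_count:
--             element_count[element] += 1
--         else:
--             element_count[element] = 1
--
--         if element_count[element] >= k:
--             return element
--
--     return -1
-- ===== SOURCE B (Python) =====
-- def find_first_k_occurrence(arr, k):
--     # Offline approach: index every element's occurrence positions once,
--     # then the answer is the element whose k-th occurrence comes earliest.
--     k = max(k, 1)  # a running count of 1 already reaches any k <= 1
--     positions = {}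
--     for i, e in enumerate(arr):
--         positions.setdefault(e, []).append(i)
--     candidates = [idxs[k - 1] for idxs in positions.values() if len(idxs) >= k]
--     if not candidates:
--         return -1
--     return arr[min(candidates)]
-- ===== Notes on version B (the rewrite author's own statement) =====
-- stated objective: alternative
-- what changed: Replaces A's online early-exit scan with a maintained count dict by an offline two-stage computation: build a positions index (element -> list of occurrence indices) in one pass, then return the element whose k-th occurrence index is minimal (min over candidates), with k normalized to max(k,1).
import Mathlib
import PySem

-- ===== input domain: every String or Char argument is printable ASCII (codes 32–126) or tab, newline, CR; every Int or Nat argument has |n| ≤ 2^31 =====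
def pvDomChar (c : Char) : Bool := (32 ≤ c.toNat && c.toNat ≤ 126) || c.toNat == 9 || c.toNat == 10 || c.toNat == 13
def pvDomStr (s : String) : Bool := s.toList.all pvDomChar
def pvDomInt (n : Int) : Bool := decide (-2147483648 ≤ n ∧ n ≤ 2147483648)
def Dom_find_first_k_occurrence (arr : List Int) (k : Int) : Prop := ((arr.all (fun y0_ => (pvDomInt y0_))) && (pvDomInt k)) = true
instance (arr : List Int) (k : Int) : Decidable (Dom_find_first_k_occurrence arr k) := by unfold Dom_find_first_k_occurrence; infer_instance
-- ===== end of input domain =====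

-- B replaces A's online early-exit scan (incremental count dict) by an offline
-- two-stage computation: a positions index built once, then the element whose
-- k-th occurrence index is minimal; same return value (objective: alternative).


-- ===== PORT A =====
-- the for-loop over arr with the count dictionary as state; early return on count ≥ k
def ffkA_go (k : Int) (d : PySem.Dict Int Int) : List Int → Int
  | [] => -1
  | e :: rest =>
    let d' := if d.contains e then d.insert e (d.getD e 0 + 1) else d.insert e 1
    if k ≤ d'.getD e 0 then e else ffkA_go k d' rest

def find_first_k_occurrence (arr : List Int) (k : Int) : Int :=
  ffkA_go k PySem.Dict.empty arr

-- ===== PORT B =====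
-- k = max(k, 1); positions = {e: [occurrence indices]}; candidates = k-th
-- occurrence index of each element occurring >= k times; arr[min(candidates)].
def find_first_k_occurrence_alt (arr : List Int) (k : Int) : Int :=
  let k' := max k 1
  let positions : PySem.Dict Int (List Int) :=
    (PySem.List.enumerate arr 0).foldl
      (fun d p => d.modify p.2 [] (fun l => l ++ [p.1])) PySem.Dict.empty
  let candidates :=
    (positions.values.filter (fun idxs => k' ≤ (idxs.length : Int))).map
      (fun idxs => PySem.List.pyGetD idxs (k' - 1) (-1))  -- index in range: k' ≤ len idxs
  match PySem.List.min? candidates (fun x => x) with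
  | none => -1
  | some m => PySem.List.pyGetD arr m (-1)  -- m is a valid index of arr

-- ===== PRECONDITION & SPEC =====
def Spec_find_first_k_occurrence (arr : List Int) (k : Int) (out : Int) : Prop := out = find_first_k_occurrence_alt arr k
instance (arr : List Int) (k : Int) (out : Int) : Decidable (Spec_find_first_k_occurrence arr k out) := by unfold Spec_find_first_k_occurrence; infer_instance

-- ===== CLAIM (what is proved, stated in full; the proofs are below) =====
def Claim_equal_find_first_k_occurrence : Prop := ∀ (arr : List Int) (k : Int), Dom_find_first_k_occurrence arr k → Spec_find_first_k_occurrence arr k (find_first_k_occurrence arr k)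

-- ===== LEMMAS AND PROOFS =====

-- prefix count of the element at index j (the running count A maintains)
def ffkCnt (arr : List Int) (j : Nat) : Nat := (arr.take (j + 1)).count (arr.getD j 0)

-- reference index scan: first j with k ≤ prefix count
def ffkRef (arr : List Int) (k : Int) (i : Nat) : Int :=
  if h : i < arr.length then
    if k ≤ (ffkCnt arr i : Int) then arr.getD i 0 else ffkRef arr k (i + 1)
  else -1
termination_by arr.length - i

-- occurrence-index list of e in l, indices offset by s
def ffkF (l : List Int) (s : Int) (e : Int) : List Int :=
  ((PySem.List.enumerate l s).filter (fun p => p.2 == e)).map (fun p => p.1)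

theorem ffkCnt_pos (arr : List Int) (j : Nat) (h : j < arr.length) : 1 ≤ ffkCnt arr j := by
  have hj : j < (arr.take (j + 1)).length := by simp [List.length_take]; omega
  have hg : (arr.take (j + 1))[j] = arr[j] := List.getElem_take
  have hmem : arr.getD j 0 ∈ arr.take (j + 1) := by
    rw [List.getD_eq_getElem arr 0 h, ← hg]
    exact List.getElem_mem hj
  exact List.count_pos_iff.mpr hmem

-- A's dict loop equals the reference scan (dict = counts of the processed prefix)
theorem ffkA_eq_ref (arr : List Int) (k : Int) :
    ∀ (rest : List Int) (i : Nat) (d : PySem.Dict Int Int),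
      rest = arr.drop i →
      (∀ x, d.getD x 0 = ((arr.take i).count x : Int)) →
      ffkA_go k d rest = ffkRef arr k i := by
  intro rest
  induction rest with
  | nil =>
    intro i d hdrop hinv
    have hlen : ¬ i < arr.length := by
      intro hlt
      have := List.drop_eq_nil_iff.mp hdrop.symm
      omega
    rw [ffkRef]
    simp [ffkA_go, hlen]
  | cons e rest ih =>
    intro i d hdrop hinv
    have hlt : i < arr.length := by
      by_contra hge
      have : arr.drop i = [] := List.drop_eq_nil_iff.mpr (by omega)
      rw [this] at hdrop
      simp at hdrop
    have hd2 := hdrop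
    rw [List.drop_eq_getElem_cons hlt] at hd2
    injection hd2 with he' hrest'
    have he : arr[i] = e := he'.symm
    have hgd : arr.getD i 0 = e := by rw [List.getD_eq_getElem arr 0 hlt, he]
    have htake : arr.take (i + 1) = arr.take i ++ [e] := by
      rw [List.take_add_one]
      simp [List.getElem?_eq_getElem hlt, he]
    set d' := if d.contains e then d.insert e (d.getD e 0 + 1) else d.insert e 1 with hd'
    have hde : d'.getD e 0 = ((arr.take (i + 1)).count e : Int) := by
      have hcnt : ((arr.take (i + 1)).count e : Int) = ((arr.take i).count e : Int) + 1 := by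
        rw [htake]; push_cast [List.count_append]; simp
      rw [hcnt, ← hinv e, hd']
      by_cases hc : d.contains e
      · simp [hc, PySem.Dict.getD_insert_self]
      · have hc' : d.contains e = false := by simpa using hc
        rw [if_neg (by simp [hc']), PySem.Dict.getD_insert_self,
          PySem.Dict.getD_of_not_contains d 0 hc']
        norm_num
    have hinv' : ∀ x, d'.getD x 0 = ((arr.take (i + 1)).count x : Int) := by
      intro x
      by_cases hx : x = e
      · rw [hx]; exact hde
      · have hex : ¬ e = x := fun h => hx h.symm
        have hcnt : (arr.take (i + 1)).count x = (arr.take i).count x := by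
          rw [htake, List.count_append]
          simp [hex]
        rw [hcnt, ← hinv x, hd']
        by_cases hc : d.contains e
        · rw [if_pos hc, PySem.Dict.getD_insert_of_ne d _ 0 hx]
        · rw [if_neg hc, PySem.Dict.getD_insert_of_ne d _ 0 hx]
    have hcnti : (ffkCnt arr i : Int) = (((arr.take (i + 1)).count e : Nat) : Int) := by
      rw [ffkCnt, hgd]
    rw [ffkRef]
    simp only [hlt, dif_pos, hcnti, hgd]
    rw [ffkA_go]
    simp only [← hd', hde]
    by_cases hk : k ≤ ((arr.take (i + 1)).count e : Int)
    · simp [hk]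
    · simp only [hk, if_false]
      exact ih (i + 1) d' hrest' hinv' 

theorem ffkRef_max_one (arr : List Int) (k : Int) (i : Nat) :
    ffkRef arr k i = ffkRef arr (max k 1) i := by
  have H : ∀ (n i : Nat), arr.length - i ≤ n → ffkRef arr k i = ffkRef arr (max k 1) i := by
    intro n
    induction n with
    | zero =>
      intro i hn
      have hi : ¬ i < arr.length := by omega
      conv_lhs => rw [ffkRef]
      conv_rhs => rw [ffkRef]
      simp [hi]
    | succ n ih =>
      intro i hn
      conv_lhs => rw [ffkRef]
      conv_rhs => rw [ffkRef]
      by_cases hi : i < arr.length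
      · have h1 : 1 ≤ (ffkCnt arr i : Int) := by exact_mod_cast ffkCnt_pos arr i hi
        by_cases hk : k ≤ (ffkCnt arr i : Int)
        · have hk' : max k 1 ≤ (ffkCnt arr i : Int) := by omega
          simp [hi, hk, hk']
          
        · have hk' : ¬ max k 1 ≤ (ffkCnt arr i : Int) := by omega
          simp only [hi, dif_pos, hk, hk', if_false]
          exact ih (i + 1) (by omega)
      · simp [hi]
  exact H (arr.length - i) i (le_refl _)

theorem ffkRef_of_none (arr : List Int) (k : Int) (i : Nat)
    (h : ∀ j, i ≤ j → j < arr.length → ¬ (k ≤ (ffkCnt arr j : Int))) :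
    ffkRef arr k i = -1 := by
  have H : ∀ (n i : Nat), arr.length - i ≤ n →
      (∀ j, i ≤ j → j < arr.length → ¬ (k ≤ (ffkCnt arr j : Int))) → ffkRef arr k i = -1 := by
    intro n
    induction n with
    | zero =>
      intro i hn _
      have hi : ¬ i < arr.length := by omega
      rw [ffkRef]; simp [hi]
    | succ n ih =>
      intro i hn hall
      rw [ffkRef]
      by_cases hi : i < arr.length
      · have hk : ¬ (k ≤ (ffkCnt arr i : Int)) := hall i (le_refl i) hi
        simp only [hi, dif_pos, hk, if_false]
        exact ih (i + 1) (by omega) (fun j hj hjl => hall j (by omega) hjl)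
      · simp [hi]
  exact H (arr.length - i) i (le_refl _) h

theorem ffkRef_of_found (arr : List Int) (k : Int) (i : Nat) (j₀ : Nat)
    (hlen : j₀ < arr.length) (hij : i ≤ j₀) (hq : k ≤ (ffkCnt arr j₀ : Int))
    (hmin : ∀ j, i ≤ j → j < j₀ → ¬ (k ≤ (ffkCnt arr j : Int))) :
    ffkRef arr k i = arr.getD j₀ 0 := by
  have H : ∀ (n i : Nat), arr.length - i ≤ n → i ≤ j₀ →
      (∀ j, i ≤ j → j < j₀ → ¬ (k ≤ (ffkCnt arr j : Int))) → ffkRef arr k i = arr.getD j₀ 0 := by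
    intro n
    induction n with
    | zero =>
      intro i hn hij _
      omega
    | succ n ih =>
      intro i hn hij hmin'
      rw [ffkRef]
      have hi : i < arr.length := by omega
      by_cases hji : i = j₀
      · subst hji
        simp [hi, hq]
      · have hk : ¬ (k ≤ (ffkCnt arr i : Int)) := hmin' i (le_refl i) (by omega)
        simp only [hi, dif_pos, hk, if_false]
        exact ih (i + 1) (by omega) (by omega) (fun j hj hjl => hmin' j (by omega) hjl)
  exact H (arr.length - i) i (le_refl _) hij hmin

theorem ffkF_cons (x : Int) (l : List Int) (s e : Int) :
    ffkF (x :: l) s e = (if x = e then [s] else []) ++ ffkF l (s + 1) e := by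
  simp only [ffkF, PySem.List.enumerate_cons, List.filter_cons]
  by_cases hx : x = e
  · simp [hx]
  · simp [hx]

theorem ffkF_cons_self (x : Int) (l : List Int) (s : Int) :
    ffkF (x :: l) s x = s :: ffkF l (s + 1) x := by
  rw [ffkF_cons]; simp

theorem ffkF_cons_ne (x : Int) (l : List Int) (s e : Int) (hx : x ≠ e) :
    ffkF (x :: l) s e = ffkF l (s + 1) e := by
  rw [ffkF_cons]; simp [hx]

theorem ffkF_length (l : List Int) (s e : Int) : (ffkF l s e).length = l.count e := by
  induction l generalizing s with
  | nil => simp [ffkF, PySem.List.enumerate_nil]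
  | cons x t ih =>
    rw [ffkF_cons]
    by_cases hx : x = e <;> simp [hx, ih]

theorem ffkF_get (l : List Int) (e : Int) :
    ∀ (m : Nat) (s : Int), m < l.count e →
      ∃ j : Nat, j < l.length ∧ (ffkF l s e)[m]? = some (s + j) ∧
        l.getD j 0 = e ∧ (l.take (j + 1)).count e = m + 1 := by
  induction l with
  | nil => intro m s hm; simp at hm
  | cons x t ih =>
    intro m s hm
    by_cases hx : x = e
    · subst hx
      rw [ffkF_cons_self]
      cases m with
      | zero =>
        exact ⟨0, by simp, by simp, by simp, by simp⟩
      | succ m' =>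
        have hm' : m' < t.count x := by
          simp at hm; omega
        obtain ⟨j', hj'len, hj'get, hj'gd, hj'cnt⟩ := ih m' (s + 1) hm'
        refine ⟨j' + 1, by simp; omega, ?_, by simpa using hj'gd, ?_⟩
        · rw [List.getElem?_cons_succ, hj'get]; congr 1; push_cast; ring
        · simp [hj'cnt]
    · rw [ffkF_cons_ne x t s e hx]
      have hm' : m < t.count e := by
        have : (x :: t).count e = t.count e := by
          simp [hx]
        omega
      obtain ⟨j', hj'len, hj'get, hj'gd, hj'cnt⟩ := ih m (s + 1) hm'
      refine ⟨j' + 1, by simp; omega, ?_, by simpa using hj'gd, ?_⟩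
      · rw [hj'get]; congr 1; push_cast; ring
      · simp [hj'cnt, hx]

theorem ffkF_conv (l : List Int) (e : Int) :
    ∀ (j : Nat) (s : Int), j < l.length → l.getD j 0 = e →
      (ffkF l s e)[(l.take (j + 1)).count e - 1]? = some (s + j) := by
  induction l with
  | nil => intro j s hj; simp at hj
  | cons x t ih =>
    intro j s hj hgd
    by_cases hx : x = e
    · subst hx
      rw [ffkF_cons_self]
      cases j with
      | zero => simp
      | succ j' =>
        have hgd' : t.getD j' 0 = x := by simpa using hgd
        have hpos : 1 ≤ (t.take (j' + 1)).count x := by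
          have hj' : j' < t.length := by simpa using hj
          have := ffkCnt_pos t j' hj'
          rwa [ffkCnt, hgd'] at this
        have hcnt : ((x :: t).take (j' + 1 + 1)).count x = (t.take (j' + 1)).count x + 1 := by
          simp
        rw [hcnt]
        have : (t.take (j' + 1)).count x + 1 - 1 = ((t.take (j' + 1)).count x - 1) + 1 := by omega
        rw [this]
        rw [List.getElem?_cons_succ, ih j' (s + 1) (by simpa using hj) hgd']
        congr 1; push_cast; ring
    · rw [ffkF_cons_ne x t s e hx]
      cases j with
      | zero => simp at hgd; exact absurd hgd hx
      | succ j' =>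
        have hgd' : t.getD j' 0 = e := by simpa using hgd
        have hcnt : ((x :: t).take (j' + 1 + 1)).count e = (t.take (j' + 1)).count e := by
          simp [hx]
        rw [hcnt]
        rw [ih j' (s + 1) (by simpa using hj) hgd']
        congr 1; push_cast; ring

-- the positions dict of B, by its closed forms
theorem ffk_positions_getD (arr : List Int) (e : Int) :
    (((PySem.List.enumerate arr 0).foldl
        (fun d p => d.modify p.2 [] (fun l => l ++ [p.1]))
        (PySem.Dict.empty : PySem.Dict Int (List Int))).getD e []) = ffkF arr 0 e := by
  have hstep : (PySem.List.enumerate arr 0).foldl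
      (fun d p => d.modify p.2 [] (fun l => l ++ [p.1]))
      (PySem.Dict.empty : PySem.Dict Int (List Int))
      = ((PySem.List.enumerate arr 0).map (fun p => (p.2, p.1))).foldl
        (fun d q => d.modify q.1 [] (fun l => l ++ [q.2])) PySem.Dict.empty := by
    rw [List.foldl_map]
  rw [hstep, PySem.Dict.getD_foldl_modify_append]
  rw [List.filter_map]
  simp [ffkF, List.map_map, Function.comp_def]

theorem ffk_positions_keys (arr : List Int) :
    ((PySem.List.enumerate arr 0).foldl
        (fun d p => d.modify p.2 [] (fun l => l ++ [p.1]))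
        (PySem.Dict.empty : PySem.Dict Int (List Int))).keys = PySem.Set.ofList arr := by
  rw [PySem.Dict.keys_foldl_modify_key (PySem.List.enumerate arr 0) (fun p => p.2) []
    (fun _ p => fun l => l ++ [p.1]) PySem.Dict.empty]
  rw [PySem.List.map_snd_enumerate]
  rw [PySem.Set.ofList_eq_foldl]
  rfl

theorem ffk_positions_nodup (arr : List Int) :
    ((PySem.List.enumerate arr 0).foldl
        (fun d p => d.modify p.2 [] (fun l => l ++ [p.1]))
        (PySem.Dict.empty : PySem.Dict Int (List Int))).keys.Nodup := by
  exact PySem.Dict.nodup_keys_foldl_modify_key (PySem.List.enumerate arr 0) (fun p => p.2) []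
    (fun _ p => fun l => l ++ [p.1]) PySem.Dict.empty (by simp [PySem.Dict.empty, PySem.Dict.keys])

-- the candidate list of B, in closed form
def ffkCands (arr : List Int) (k' : Int) : List Int :=
  (((PySem.Set.ofList arr).map (fun e => ffkF arr 0 e)).filter
      (fun idxs => k' ≤ (idxs.length : Int))).map
    (fun idxs => PySem.List.pyGetD idxs (k' - 1) (-1))

theorem ffk_alt_closed (arr : List Int) (k : Int) :
    find_first_k_occurrence_alt arr k =
      match PySem.List.min? (ffkCands arr (max k 1)) (fun x => x) with
      | none => -1
      | some m => PySem.List.pyGetD arr m (-1) := by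
  simp only [find_first_k_occurrence_alt]
  rw [PySem.Dict.values_eq_map_keys _ (ffk_positions_nodup arr) []]
  rw [ffk_positions_keys]
  rw [List.map_congr_left (fun e _ => ffk_positions_getD arr e)]
  rfl

theorem ffk_cand_mem (arr : List Int) (k' : Int) (hk1 : 1 ≤ k') (c : Int)
    (hc : c ∈ ffkCands arr k') :
    ∃ j : Nat, c = (j : Int) ∧ j < arr.length ∧ k' ≤ (ffkCnt arr j : Int) := by
  obtain ⟨idxs, hfil, hval⟩ := List.mem_map.mp hc
  obtain ⟨hmapmem, hlen⟩ := List.mem_filter.mp hfil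
  obtain ⟨e, _, hidxs⟩ := List.mem_map.mp hmapmem
  subst hidxs
  rw [ffkF_length] at hlen
  have hlen' : k' ≤ (arr.count e : Int) := by simpa using hlen
  have hm : k'.toNat - 1 < arr.count e := by omega
  obtain ⟨j, hjlen, hjget, hjgd, hjcnt⟩ := ffkF_get arr e (k'.toNat - 1) 0 hm
  refine ⟨j, ?_, hjlen, ?_⟩
  · have hidx : k' - 1 = ((k'.toNat - 1 : Nat) : Int) := by omega
    rw [← hval, hidx, PySem.List.pyGetD_natCast]
    rw [List.getD_eq_getElem?_getD, hjget]
    simp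
  · have : ffkCnt arr j = k'.toNat := by
      rw [ffkCnt, hjgd, hjcnt]; omega
    omega

theorem ffk_cand_of_min (arr : List Int) (k' : Int) (hk1 : 1 ≤ k') (j₀ : Nat)
    (hlen : j₀ < arr.length) (hq : k' ≤ (ffkCnt arr j₀ : Int))
    (hmin : ∀ j, j < j₀ → j < arr.length → ¬ (k' ≤ (ffkCnt arr j : Int))) :
    ((j₀ : Nat) : Int) ∈ ffkCands arr k' := by
  set e := arr.getD j₀ 0 with he
  -- at the first index reaching k', the prefix count is exactly k'
  have hc1 : (arr.take j₀).count e < k'.toNat := by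
    by_contra hge
    rw [Nat.not_lt] at hge
    have hm : k'.toNat - 1 < (arr.take j₀).count e := by omega
    obtain ⟨j, hjlen, _, hjgd, hjcnt⟩ := ffkF_get (arr.take j₀) e (k'.toNat - 1) 0 hm
    have hjlt : j < j₀ := by
      have : (arr.take j₀).length ≤ j₀ := by simp
      omega
    have hjarr : j < arr.length := by
      have : (arr.take j₀).length ≤ arr.length := by simp
      omega
    have htt : (arr.take j₀).take (j + 1) = arr.take (j + 1) := by
      rw [List.take_take]
      congr 1
      omega
    have hgd' : arr.getD j 0 = e := by
      rw [← hjgd]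
      rw [List.getD_eq_getElem?_getD, List.getD_eq_getElem?_getD, List.getElem?_take]
      simp [hjlt]
    have : ffkCnt arr j = k'.toNat := by
      rw [ffkCnt, hgd', ← htt, hjcnt]
      omega
    exact hmin j hjlt hjarr (by omega)
  have hsplit : arr.take (j₀ + 1) = arr.take j₀ ++ [e] := by
    rw [List.take_add_one]
    rw [he, List.getD_eq_getElem arr 0 hlen]
    simp [List.getElem?_eq_getElem hlen]
  have hcnt_succ : ffkCnt arr j₀ = (arr.take j₀).count e + 1 := by
    rw [ffkCnt, ← he, hsplit, List.count_append]
    simp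
  have hexact : ffkCnt arr j₀ = k'.toNat := by omega
  have hcnt_take : (arr.take (j₀ + 1)).count e = k'.toNat := by
    rw [← hexact, ffkCnt, he]
  have htot : k' ≤ (arr.count e : Int) := by
    have : (arr.take (j₀ + 1)).count e ≤ arr.count e :=
      List.Sublist.count_le e (List.take_sublist _ _)
    omega
  have hemem : e ∈ arr := by
    rw [he, List.getD_eq_getElem arr 0 hlen]
    exact List.getElem_mem hlen
  have hconv := ffkF_conv arr e j₀ 0 hlen he.symm
  rw [hcnt_take] at hconv
  refine List.mem_map.mpr ⟨ffkF arr 0 e, List.mem_filter.mpr ⟨List.mem_map.mpr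
    ⟨e, (PySem.Set.mem_ofList arr e).mpr hemem, rfl⟩, ?_⟩, ?_⟩
  · rw [ffkF_length]
    simpa using htot
  · have hidx : k' - 1 = ((k'.toNat - 1 : Nat) : Int) := by omega
    rw [hidx, PySem.List.pyGetD_natCast]
    rw [List.getD_eq_getElem?_getD, hconv]
    simp

-- ===== VERDICT (by name: the statement is the Claim_ definition above) =====
theorem find_first_k_occurrence_spec : Claim_equal_find_first_k_occurrence := by
  intro arr k _
  unfold Spec_find_first_k_occurrence
  have hk1 : (1 : Int) ≤ max k 1 := le_max_right k 1
  have hA : find_first_k_occurrence arr k = ffkRef arr (max k 1) 0 := by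
    rw [find_first_k_occurrence,
      ffkA_eq_ref arr k arr 0 PySem.Dict.empty (by simp) (by simp),
      ffkRef_max_one]
  rw [hA, ffk_alt_closed]
  by_cases hex : ∃ j, j < arr.length ∧ max k 1 ≤ (ffkCnt arr j : Int)
  · classical
    have hfind := Nat.find_spec hex
    set j₀ := Nat.find hex with hj₀
    obtain ⟨hj₀len, hj₀q⟩ := hfind
    have hj₀min : ∀ j, j < j₀ → j < arr.length → ¬ (max k 1 ≤ (ffkCnt arr j : Int)) := by
      intro j hj hjl hq
      exact Nat.find_min hex hj ⟨hjl, hq⟩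
    rw [ffkRef_of_found arr (max k 1) 0 j₀ hj₀len (Nat.zero_le _) hj₀q
      (fun j _ hjlt => hj₀min j hjlt (by omega))]
    have hmem := ffk_cand_of_min arr (max k 1) hk1 j₀ hj₀len hj₀q hj₀min
    have hne : ffkCands arr (max k 1) ≠ [] := fun hnil => by
      rw [hnil] at hmem; exact absurd hmem (List.not_mem_nil)
    obtain ⟨m, hm⟩ : ∃ m, PySem.List.min? (ffkCands arr (max k 1)) (fun x => x) = some m := by
      cases hmin : PySem.List.min? (ffkCands arr (max k 1)) (fun x => x) with
      | none => exact absurd ((PySem.List.min?_eq_none_iff _ _).mp hmin) hne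
      | some m => exact ⟨m, rfl⟩
    rw [hm]
    have hmmem := PySem.List.min?_mem hm
    obtain ⟨jm, hjm_eq, hjm_len, hjm_q⟩ := ffk_cand_mem arr (max k 1) hk1 m hmmem
    have h1 : m ≤ ((j₀ : Nat) : Int) := PySem.List.min?_isMin hm _ hmem
    have h2 : j₀ ≤ jm := Nat.find_min' hex ⟨hjm_len, hjm_q⟩
    have hmj : m = ((j₀ : Nat) : Int) := by omega
    rw [hmj]
    show arr.getD j₀ 0 = PySem.List.pyGetD arr ((j₀ : Nat) : Int) (-1)
    rw [PySem.List.pyGetD_natCast]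
    rw [List.getD_eq_getElem arr 0 hj₀len, List.getD_eq_getElem arr (-1) hj₀len]
  · rw [ffkRef_of_none arr (max k 1) 0 (fun j _ hjl => by
      have := not_exists.mp hex j; omega)]
    have hnil : ffkCands arr (max k 1) = [] := by
      by_contra hne
      obtain ⟨c, hc⟩ := List.exists_mem_of_ne_nil _ hne
      obtain ⟨j, _, hjlen, hjq⟩ := ffk_cand_mem arr (max k 1) hk1 c hc
      have := not_exists.mp hex j
      omega
    rw [hnil]
    rfl
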